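-- pv_equiv track=rewrite | github.com/zulufun/CA-UCM | backend/utils/file_naming.py | _get_cn
-- ===== SOURCE A (Python) =====
-- def _get_cn(subject: str) -> str:
--     """Extract CN from an X.509 subject string like 'CN=example,O=Org'."""
--     if not subject:
--         return ''
--     for part in subject.split(','):
--         part = part.strip()
--         if part.upper().startswith('CN='):
--             return part[3:].strip()
--     return ''
-- ===== SOURCE B (Python) =====
-- def _get_cn(subject: str) -> str:
--     """Extract CN from an X.509 subject string like 'CN=example,O=Org'."""
--     fields = {}
--     for raw in subject.split(','):
--         part = raw.strip()
--         i = part.find('=')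
--         if i < 0:
--             continue
--         fields.setdefault(part[:i].upper(), part[i + 1:])
--     return fields.get('CN', '').strip()
-- ===== Notes on version B (the rewrite author's own statement) =====
-- stated objective: idiomatic
-- what changed: A scans subject.split(',') with an early return on the first part whose upper() starts with 'CN='; B instead parses every part into a dict of fields (key before the first '=', uppercased, first occurrence wins via setdefault) and then looks up 'CN' once at the end.
import Mathlib
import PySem

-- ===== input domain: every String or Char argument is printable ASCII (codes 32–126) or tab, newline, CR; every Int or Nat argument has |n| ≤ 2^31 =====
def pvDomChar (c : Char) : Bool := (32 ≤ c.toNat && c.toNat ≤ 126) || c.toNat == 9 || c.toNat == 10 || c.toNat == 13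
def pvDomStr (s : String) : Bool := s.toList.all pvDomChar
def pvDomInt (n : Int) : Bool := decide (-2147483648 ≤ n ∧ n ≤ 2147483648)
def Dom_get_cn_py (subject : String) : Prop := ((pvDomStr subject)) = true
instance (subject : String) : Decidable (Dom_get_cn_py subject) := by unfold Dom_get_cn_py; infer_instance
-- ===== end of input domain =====

-- B replaces A's early-return scan by the idiomatic "parse all fields into a dict first
-- (first occurrence wins), then look up CN" decomposition; same cost, alternative structure.

-- ===== PORT A =====
-- A's for-loop with early return over subject.split(',')
def pvALoop : List String → String
  | [] => ""
  | p :: rest =>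
    let part := PySem.Str.strip p
    if PySem.Str.startswith (PySem.Str.upper part) "CN=" then
      PySem.Str.strip (PySem.Str.slice part (some 3) none)
    else pvALoop rest

def get_cn_py (subject : String) : String :=
  if subject = "" then ""
  else pvALoop ((PySem.Str.split? subject ",").getD [])

-- ===== PORT B =====
-- one step of B's loop body: strip, find '=', skip if absent, else setdefault
def pvBStep (d : PySem.Dict String String) (raw : String) : PySem.Dict String String :=
  let part := PySem.Str.strip raw
  let i := PySem.Str.find part "="
  if i < 0 then d
  else d.setdefault (PySem.Str.upper (PySem.Str.slice part none (some i)))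
                    (PySem.Str.slice part (some (i + 1)) none)

def get_cn_py_alt (subject : String) : String :=
  let fields := ((PySem.Str.split? subject ",").getD []).foldl pvBStep PySem.Dict.empty
  PySem.Str.strip (fields.getD "CN" "")

-- ===== PRECONDITION & SPEC =====
def Spec_get_cn_py (subject : String) (out : String) : Prop := out = get_cn_py_alt subject
instance (subject : String) (out : String) : Decidable (Spec_get_cn_py subject out) := by unfold Spec_get_cn_py; infer_instance

-- ===== CLAIM (what is proved, stated in full; the proofs are below) =====
def Claim_equal_get_cn_py : Prop := ∀ (subject : String), Dom_get_cn_py subject → Spec_get_cn_py subject (get_cn_py subject)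

-- ===== LEMMAS AND PROOFS =====

-- pvBStep with its let-bindings expanded, for rewriting
lemma pvBStep_eq (d : PySem.Dict String String) (raw : String) :
    pvBStep d raw =
      if PySem.Str.find (PySem.Str.strip raw) "=" < 0 then d
      else d.setdefault
        (PySem.Str.upper (PySem.Str.slice (PySem.Str.strip raw) none
          (some (PySem.Str.find (PySem.Str.strip raw) "="))))
        (PySem.Str.slice (PySem.Str.strip raw)
          (some (PySem.Str.find (PySem.Str.strip raw) "=" + 1)) none) := rfl

lemma upperChar_eq_eq (c : Char) (h : PySem.Chars.upperChar c = '=') : c = '=' := by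
  unfold PySem.Chars.upperChar at h
  split_ifs at h with hl
  · exfalso
    simp only [PySem.Chars.islower, Bool.and_eq_true, decide_eq_true_eq] at hl
    have hl1 : ('a' : Char).toNat ≤ c.toNat := Fin.mk_le_mk.mp hl.1
    have hl2 : c.toNat ≤ ('z' : Char).toNat := Fin.mk_le_mk.mp hl.2
    have ha : ('a' : Char).toNat = 97 := by decide
    have hz : ('z' : Char).toNat = 122 := by decide
    have h2 := congrArg Char.toNat h
    rw [Char.toNat_ofNat, if_pos (Or.inl (by omega))] at h2
    have he : ('=' : Char).toNat = 61 := by decide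
    omega
  · exact h

lemma single_prefix_iff (cs : List Char) (j : Nat) (c : Char) :
    [c] <+: cs.drop j ↔ cs[j]? = some c := by
  rw [← List.head?_drop]
  cases cs.drop j with
  | nil => simp
  | cons a t => simp [List.cons_prefix_cons, eq_comm]

lemma find_single_eq (cs : List Char) (c : Char) (k : Nat)
    (hk : cs[k]? = some c) (hmin : ∀ j < k, cs[j]? ≠ some c) :
    PySem.Chars.find cs [c] = (k : Int) := by
  have hinf : 0 ≤ PySem.Chars.find cs [c] := by
    rw [PySem.Chars.find_nonneg_iff]
    rw [← PySem.Chars.isIn_iff_infix, ← PySem.Chars.exists_prefix_drop_iff_isIn]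
    exact ⟨k, (single_prefix_iff cs k c).mpr hk⟩
    -- `List Char` BEq side conditions are defeq; nothing else needed
  obtain ⟨h1, h2⟩ := PySem.Chars.find_spec (s := cs) (sub := [c]) hinf
  rw [single_prefix_iff] at h1
  have hle : (PySem.Chars.find cs [c]).toNat ≤ k := by
    by_contra hgt
    exact (h2 k (by omega)) ((single_prefix_iff cs k c).mpr hk)
  have hge : k ≤ (PySem.Chars.find cs [c]).toNat := by
    by_contra hlt
    exact hmin _ (by omega) h1
  omega

lemma find_single_spec (cs : List Char) (c : Char)
    (h : 0 ≤ PySem.Chars.find cs [c]) :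
    cs[(PySem.Chars.find cs [c]).toNat]? = some c ∧
      ∀ j < (PySem.Chars.find cs [c]).toNat, cs[j]? ≠ some c := by
  obtain ⟨h1, h2⟩ := PySem.Chars.find_spec (s := cs) (sub := [c]) h
  rw [single_prefix_iff] at h1
  exact ⟨h1, fun j hj hc => h2 j hj ((single_prefix_iff cs j c).mpr hc)⟩

lemma startswith_decomp (cs : List Char) :
    PySem.Chars.startswith (PySem.Chars.upper cs) ['C', 'N', '='] = true ↔
      ∃ c1 c2 rest, cs = c1 :: c2 :: '=' :: rest ∧
        PySem.Chars.upperChar c1 = 'C' ∧ PySem.Chars.upperChar c2 = 'N' := by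
  rw [PySem.Chars.startswith_iff]
  constructor
  · intro h
    obtain ⟨t, ht⟩ := h
    match cs with
    | [] => simp [PySem.Chars.upper] at ht
    | [c1] => simp [PySem.Chars.upper] at ht
    | [c1, c2] => simp [PySem.Chars.upper] at ht
    | c1 :: c2 :: c3 :: rest =>
      simp [PySem.Chars.upper] at ht
      obtain ⟨h1, h2, h3, _⟩ := ht
      exact ⟨c1, c2, rest, by rw [upperChar_eq_eq c3 h3.symm], h1.symm, h2.symm⟩
  · rintro ⟨c1, c2, rest, rfl, h1, h2⟩
    refine ⟨PySem.Chars.upper rest, ?_⟩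
    simp [PySem.Chars.upper, h1, h2]
    decide

-- hit case: the stripped part starts (case-insensitively) with "CN="
lemma hit_facts (part : String)
    (h : PySem.Str.startswith (PySem.Str.upper part) "CN=" = true) :
    PySem.Str.find part "=" = 2 ∧
      PySem.Str.upper (PySem.Str.slice part none (some 2)) = "CN" := by
  have hc : PySem.Chars.startswith (PySem.Chars.upper part.toList) ['C', 'N', '='] = true := by
    simpa [PySem.Str.startswith, PySem.Str.toList_upper] using h
  obtain ⟨c1, c2, rest, hcs, h1, h2⟩ := (startswith_decomp part.toList).mp hc
  have hne1 : c1 ≠ '=' := by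
    intro e; rw [e] at h1; revert h1; decide
  have hne2 : c2 ≠ '=' := by
    intro e; rw [e] at h2; revert h2; decide
  have hfind : PySem.Chars.find part.toList ['='] = ((2 : Nat) : Int) := by
    apply find_single_eq
    · rw [hcs]; rfl
    · intro j hj
      interval_cases j <;> rw [hcs] <;> simp [hne1, hne2]
  constructor
  · have : PySem.Str.find part "=" = PySem.Chars.find part.toList ['='] := by
      simp [PySem.Str.find_eq]
    rw [this, hfind]; norm_num
  · apply String.toList_inj.mp
    rw [PySem.Str.toList_upper, PySem.Str.toList_slice]
    rw [PySem.Chars.slice_eq_listSlice, PySem.List.slice_to _ (by norm_num)]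
    rw [hcs]
    simp [PySem.Chars.upper, h1, h2]

-- miss case: either no '=' in the part, or the key before the first '=' is not CN
lemma miss_facts (part : String)
    (h : PySem.Str.startswith (PySem.Str.upper part) "CN=" = false) :
    PySem.Str.find part "=" < 0 ∨
      (0 ≤ PySem.Str.find part "=" ∧
        PySem.Str.upper (PySem.Str.slice part none (some (PySem.Str.find part "="))) ≠ "CN") := by
  by_cases hneg : PySem.Str.find part "=" < 0
  · exact Or.inl hneg
  rw [not_lt] at hneg
  refine Or.inr ⟨hneg, ?_⟩
  intro hkey
  have hfe : PySem.Str.find part "=" = PySem.Chars.find part.toList ['='] := by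
    simp [PySem.Str.find_eq]
  set i := PySem.Chars.find part.toList ['='] with hi
  have hnn : 0 ≤ i := by rw [← hfe]; exact hneg
  obtain ⟨hget, _⟩ := find_single_spec part.toList '=' hnn
  have hkl := congrArg String.toList hkey
  rw [PySem.Str.toList_upper, PySem.Str.toList_slice] at hkl
  rw [PySem.Chars.slice_eq_listSlice, hfe, PySem.List.slice_to _ hnn] at hkl
  have hcn : PySem.Chars.upper (part.toList.take i.toNat) = ['C', 'N'] := by
    rw [hkl]; decide
  have hlen2 : min i.toNat part.toList.length = 2 := by
    have := congrArg List.length hcn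
    simpa [PySem.Chars.upper] using this
  have hklt : i.toNat < part.toList.length := by
    by_contra hge
    rw [List.getElem?_eq_none_iff.mpr (by omega)] at hget
    simp at hget
  have hk2 : i.toNat = 2 := by omega
  rw [hk2] at hget hcn
  match hcs : part.toList with
  | [] => rw [hcs] at hget; simp at hget
  | [c1] => rw [hcs] at hget; simp at hget
  | [c1, c2] => rw [hcs] at hget; simp at hget
  | c1 :: c2 :: c3 :: rest =>
    rw [hcs] at hget hcn
    simp at hget
    simp [PySem.Chars.upper] at hcn
    have : PySem.Chars.startswith (PySem.Chars.upper part.toList) ['C', 'N', '='] = true := by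
      rw [(startswith_decomp part.toList)]
      exact ⟨c1, c2, rest, by rw [hcs, hget], hcn.1, hcn.2⟩
    have hh : PySem.Chars.startswith (PySem.Chars.upper part.toList) ['C', 'N', '='] = false := by
      simpa [PySem.Str.startswith, PySem.Str.toList_upper] using h
    rw [this] at hh
    exact Bool.noConfusion hh

lemma foldl_get_preserved (parts : List String) (d : PySem.Dict String String) (v : String)
    (hd : d.get? "CN" = some v) :
    (parts.foldl pvBStep d).get? "CN" = some v := by
  induction parts generalizing d with
  | nil => simpa using hd
  | cons p rest ih =>
    rw [List.foldl_cons]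
    apply ih
    rw [pvBStep_eq]
    split_ifs with hneg
    · exact hd
    by_cases hk : PySem.Str.upper (PySem.Str.slice (PySem.Str.strip p) none (some (PySem.Str.find (PySem.Str.strip p) "="))) = "CN"
    · rw [hk, PySem.Dict.get?_setdefault_self, hd]; rfl
    · rw [PySem.Dict.get?_setdefault_of_ne _ _ (fun e => hk e.symm)]
      exact hd

lemma loop_main (parts : List String) (d : PySem.Dict String String)
    (hd : d.get? "CN" = none) :
    PySem.Str.strip ((parts.foldl pvBStep d).getD "CN" "") = pvALoop parts := by
  induction parts generalizing d with
  | nil =>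
    simp only [List.foldl_nil, pvALoop, PySem.Dict.getD_eq_get?_getD, hd]
    decide
  | cons p rest ih =>
    rw [List.foldl_cons]
    unfold pvALoop
    by_cases h : PySem.Str.startswith (PySem.Str.upper (PySem.Str.strip p)) "CN=" = true
    · obtain ⟨hfind, hkey⟩ := hit_facts (PySem.Str.strip p) h
      simp only [h, if_true]
      rw [pvBStep_eq, hfind, hkey]
      norm_num
      have hcont : PySem.Dict.contains d "CN" = false := by
        rw [PySem.Dict.contains_eq_isSome_get?, hd]; rfl
      rw [PySem.Dict.setdefault_of_not_contains _ _ hcont]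
      have hval : (PySem.Dict.insert d "CN" (PySem.Str.slice (PySem.Str.strip p) (some 3) none)).get? "CN"
          = some (PySem.Str.slice (PySem.Str.strip p) (some 3) none) :=
        PySem.Dict.get?_insert_self _ _ _
      rw [PySem.Dict.getD_eq_get?_getD, foldl_get_preserved rest _ _ hval]
      rfl
    · rw [Bool.not_eq_true] at h
      simp only [h, Bool.false_eq_true, if_false]
      rcases miss_facts (PySem.Str.strip p) h with hneg | ⟨hnn, hkey⟩
      · rw [pvBStep_eq, if_pos hneg]
        exact ih d hd
      · rw [pvBStep_eq, if_neg (by omega)]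
        apply ih
        rw [PySem.Dict.get?_setdefault_of_ne _ _ (fun e => hkey e.symm)]
        exact hd

-- ===== VERDICT (by name: the statement is the Claim_ definition above) =====
theorem get_cn_py_spec : Claim_equal_get_cn_py := by
  intro subject _
  unfold Spec_get_cn_py get_cn_py get_cn_py_alt
  split_ifs with hempty
  · subst hempty; decide
  · exact (loop_main _ PySem.Dict.empty (PySem.Dict.get?_empty _)).symm
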